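-- pv_equiv track=rewrite | github.com/Schmidl-DS-Practice/GalvanizeDSI | dsi_prep_programmies/coding _challenge_ 1_galvanize.py | distr_of_rec_digit_sums
-- ===== SOURCE A (Python) =====
-- def rec_dig_sum(n):
--   '''
--   Returns the recursive digit sum of an integer.
--
--   Parameter
--   ---------
--   n: int
--
--   Returns
--   -------
--   rec_dig_sum: int
--   the recursive digit sum of the input n
--   '''
--   summie = 0
--   n_to_str = str(n)
--   if type(n) != int:
--     return 'not an integer, try again'
--   elif n_to_str[0] == '-':
--     summie = int(n_to_str[0] + n_to_str[1])
--     n_to_str = n_to_str[2:len(n_to_str)]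
--   for ele in n_to_str:
--     summie += int(ele)
--   if summie > 9:
--     return rec_dig_sum(summie)
--
--   return summie
--
-- def distr_of_rec_digit_sums(low=0, high=1500):
--   '''
--   Returns a dictionary representing the counts
--   of recursive digit sums within a given range.
--
--   Parameters
--   ----------
--   low: int
--     an integer, 0 or positive, representing
--     the lowest value in the range of integers
--     for which finding the recursive digit sum
--   high: int
--     a positive integer greater than low, the
--     inclusive upper bound for which finding
--     the recursive digit sum
--
--   Returns
--   -------
--   dict_of_rec_dig_sums: {int:int}
--     returns a dictionary where the keys are
--     the recursive digit sums and the values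
--     are the counts of those digit sums occurring
--   '''
--
--   rec_dic = {}
--   if high <= low or low < 0:
--     return 'high must be greater than low; low must be positive'
--
--   #tested to work with below two lines
--   #if low < 0:
--     #return 'low must be positive'
--
--   for n in range(low, high + 1):
--     if rec_dig_sum(n) not in rec_dic:
--       rec_dic[rec_dig_sum(n)] = 1
--     else:
--       rec_dic[rec_dig_sum(n)] += 1
--
--   return rec_dic
-- ===== SOURCE B (Python) =====
-- def distr_of_rec_digit_sums(low=0, high=1500):
--   '''
--   Same result as A, computed in O(1): the recursive digit sum of n >= 1 is the
--   digital root 1 + (n - 1) % 9 (and 0 for n = 0), and the count of each root in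
--   [low, high] is obtained arithmetically from the residue class, not by looping
--   over the whole range.
--   '''
--   if high <= low or low < 0:
--     return 'high must be greater than low; low must be positive'
--   # key order = first-occurrence order of digital roots, settled within the
--   # first ten values of the range
--   ks = list(dict.fromkeys(
--       (0 if n == 0 else 1 + (n - 1) % 9) for n in range(low, min(high, low + 9) + 1)))
--   L = max(low, 1)
--   return {k: (1 if k == 0 else (high - k) // 9 - (L - 1 - k) // 9) for k in ks}
-- ===== Notes on version B (the rewrite author's own statement) =====
-- stated objective: faster
-- what changed: A computes each element's recursive digit sum via string conversion and recursion for every n in [low, high] and tallies them in a dict; B uses the closed-form digital root 1+(n-1)%9 and counts each residue class arithmetically with two floor divisions, looking only at the first ten values of the range to fix the dict's key order.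
import Mathlib
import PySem

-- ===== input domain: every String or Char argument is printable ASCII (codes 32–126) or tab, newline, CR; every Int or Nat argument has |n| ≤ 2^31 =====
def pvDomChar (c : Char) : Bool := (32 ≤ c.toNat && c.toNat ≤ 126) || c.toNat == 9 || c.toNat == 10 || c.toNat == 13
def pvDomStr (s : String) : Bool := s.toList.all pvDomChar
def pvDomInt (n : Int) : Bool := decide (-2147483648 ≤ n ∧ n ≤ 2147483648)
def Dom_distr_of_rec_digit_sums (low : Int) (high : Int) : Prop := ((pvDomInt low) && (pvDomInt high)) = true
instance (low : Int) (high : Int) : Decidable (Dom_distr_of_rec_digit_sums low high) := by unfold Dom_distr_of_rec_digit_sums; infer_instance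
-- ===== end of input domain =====

-- B replaces A's per-element recursive digit-sum loop over the whole range by the
-- closed-form digital root and arithmetic counting of residue classes.


-- ===== PORT A =====
-- rec_dig_sum, transliterated.  The Python recursion terminates because the digit sum
-- strictly shrinks; here it is driven by fuel (fuel 100 is never exhausted on the
-- domain's integers — each recursive argument is a digit sum, ≤ 90 after one step).
-- `int(ele)` on a single char of str(n) after sign removal never raises, so `.getD 0`
-- is exact here; n_to_str[2:len(n_to_str)] with nonnegative bounds 2, len is `drop 2`.
def recDigSumA : Nat → Int → Int
  | 0, _ => 0
  | fuel + 1, n =>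
    let n_to_str := PySem.Int.toChars n
    let p : Int × List Char :=
      if n_to_str.headD ' ' = '-' then
        ((PySem.Int.ofChars? (n_to_str.take 2)).getD 0, n_to_str.drop 2)
      else (0, n_to_str)
    let summie := p.2.foldl (fun acc ele => acc + (PySem.Int.ofChars? [ele]).getD 0) p.1
    if summie > 9 then recDigSumA fuel summie else summie

def distr_of_rec_digit_sums (low : Int) (high : Int) : List (Int × Int) :=
  -- on this branch the Python returns an error STRING, not a dict; excluded by Pre_
  if high ≤ low ∨ low < 0 then []
  else
    ((PySem.List.pyRange low (high + 1) 1).foldl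
      (fun (rec_dic : PySem.Dict Int Int) n =>
        if rec_dic.contains (recDigSumA 100 n) = false then
          rec_dic.insert (recDigSumA 100 n) 1
        else
          rec_dic.insert (recDigSumA 100 n) (rec_dic.getD (recDigSumA 100 n) 0 + 1))
      PySem.Dict.empty).items

-- ===== PORT B =====
-- closed-form digital root: 0 for n = 0, else 1 + (n - 1) % 9
def drB (n : Int) : Int := if n = 0 then 0 else 1 + PySem.Int.mod (n - 1) 9

def distr_of_rec_digit_sums_alt (low : Int) (high : Int) : List (Int × Int) :=
  if high ≤ low ∨ low < 0 then []
  else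
    -- ks = list(dict.fromkeys(...)) over the first ten values; each count in O(1)
    (PySem.List.dedup
      ((PySem.List.pyRange low (min high (low + 9) + 1) 1).map drB)).map
      (fun k =>
        (k, if k = 0 then 1
            else PySem.Int.floordiv (high - k) 9
              - PySem.Int.floordiv (max low 1 - 1 - k) 9))

-- ===== PRECONDITION & SPEC =====
-- Pre_ excludes exactly the guard branch (high ≤ low or low < 0), on which the Python
-- returns an error string instead of a dict — no value of the declared return type.
def Pre_distr_of_rec_digit_sums (low : Int) (high : Int) : Prop := 0 ≤ low ∧ low < high
instance (low : Int) (high : Int) : Decidable (Pre_distr_of_rec_digit_sums low high) := by unfold Pre_distr_of_rec_digit_sums; infer_instance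
def pvWitness_distr_of_rec_digit_sums : Int × Int := (0, 20)

def Spec_distr_of_rec_digit_sums (low : Int) (high : Int) (out : List (Int × Int)) : Prop := out = distr_of_rec_digit_sums_alt low high
instance (low : Int) (high : Int) (out : List (Int × Int)) : Decidable (Spec_distr_of_rec_digit_sums low high out) := by unfold Spec_distr_of_rec_digit_sums; infer_instance

-- ===== CLAIM (what is proved, stated in full; the proofs are below) =====
def Claim_equal_distr_of_rec_digit_sums : Prop := ∀ (low : Int) (high : Int), Dom_distr_of_rec_digit_sums low high → Pre_distr_of_rec_digit_sums low high → Spec_distr_of_rec_digit_sums low high (distr_of_rec_digit_sums low high)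

-- ===== LEMMAS AND PROOFS =====

-- ---- str(n) for n ≥ 0, characterised through Nat.digits ----

lemma toDigitsCore_eq (fuel : Nat) : ∀ (m : Nat) (acc : List Char), m < fuel →
    Nat.toDigitsCore 10 fuel m acc
      = (if m = 0 then ['0'] else ((Nat.digits 10 m).map Nat.digitChar).reverse) ++ acc := by
  induction fuel with
  | zero => intro m acc h; omega
  | succ f ih =>
    intro m acc h
    rw [Nat.toDigitsCore]
    by_cases h0 : m / 10 = 0
    · simp only [h0, if_true]
      by_cases hm : m = 0
      · subst hm; simp [Nat.digitChar]
      · rw [if_neg hm]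
        conv_rhs => rw [Nat.digits_def' (by norm_num : (1:Nat) < 10) (Nat.pos_of_ne_zero hm)]
        rw [h0, Nat.digits_zero]
        simp [Nat.mod_eq_of_lt (show m < 10 by omega)]
    · rw [if_neg h0]
      have hm : m ≠ 0 := by omega
      rw [ih (m / 10) _ (by omega), if_neg h0]
      rw [if_neg hm]
      conv_rhs => rw [Nat.digits_def' (by norm_num : (1:Nat) < 10) (Nat.pos_of_ne_zero hm)]
      simp

lemma toDigits_eq (m : Nat) :
    Nat.toDigits 10 m
      = (if m = 0 then ['0'] else ((Nat.digits 10 m).map Nat.digitChar).reverse) := by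
  rw [Nat.toDigits, toDigitsCore_eq (m + 1) m [] (by omega), List.append_nil]

lemma ofChars?_digitChar (d : Nat) (h : d < 10) :
    (PySem.Int.ofChars? [Nat.digitChar d]).getD 0 = (d : Int) := by
  interval_cases d <;> decide

lemma digitChar_ne_dash (d : Nat) (h : d < 10) : Nat.digitChar d ≠ '-' := by
  interval_cases d <;> decide

lemma fold_toDigits (m : Nat) (a : Int) :
    (Nat.toDigits 10 m).foldl (fun acc ele => acc + (PySem.Int.ofChars? [ele]).getD 0) a
      = a + ((Nat.digits 10 m).sum : Int) := by
  rw [toDigits_eq]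
  by_cases hm : m = 0
  · subst hm
    have h0 : (PySem.Int.ofChars? ['0']).getD 0 = 0 := by decide
    simp [h0]
  · rw [if_neg hm, PySem.List.foldl_add]
    congr 1
    rw [List.map_reverse, List.sum_reverse, List.map_map]
    rw [Nat.cast_list_sum]
    apply congrArg
    apply List.map_congr_left
    intro d hd
    exact ofChars?_digitChar d (Nat.digits_lt_base (by norm_num) hd)

lemma head_toDigits_ne_dash (m : Nat) : (Nat.toDigits 10 m).headD ' ' ≠ '-' := by
  rw [toDigits_eq]
  by_cases hm : m = 0
  · subst hm; decide
  · rw [if_neg hm]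
    have hne : ((Nat.digits 10 m).map Nat.digitChar).reverse ≠ [] := by
      simp [Nat.digits_ne_nil_iff_ne_zero, hm]
    obtain ⟨x, xs, hx⟩ := List.exists_cons_of_ne_nil hne
    have hmem : x ∈ ((Nat.digits 10 m).map Nat.digitChar).reverse := by
      rw [hx]; exact List.mem_cons_self
    rw [List.mem_reverse, List.mem_map] at hmem
    obtain ⟨d, hd, hdc⟩ := hmem
    rw [hx]
    simpa [← hdc] using digitChar_ne_dash d (Nat.digits_lt_base (by norm_num) hd)

-- ---- one unfolding of rec_dig_sum on a nonnegative argument ----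

lemma recDigSumA_succ (fuel : Nat) (n : Int) (h : 0 ≤ n) :
    recDigSumA (fuel + 1) n
      = (if ((Nat.digits 10 n.toNat).sum : Int) > 9
         then recDigSumA fuel ((Nat.digits 10 n.toNat).sum : Int)
         else ((Nat.digits 10 n.toNat).sum : Int)) := by
  rw [recDigSumA]
  have htc : PySem.Int.toChars n = Nat.toDigits 10 n.toNat := by
    rw [PySem.Int.toChars, if_neg (by omega)]
  simp only [htc, if_neg (head_toDigits_ne_dash n.toNat), fold_toDigits, Int.zero_add]

-- ---- decimal digit-sum facts ----

lemma dsum_mod9 (m : Nat) : (Nat.digits 10 m).sum % 9 = m % 9 :=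
  (Nat.modEq_nine_digits_sum m).symm

lemma dsum_le : ∀ (m : Nat), (Nat.digits 10 m).sum ≤ m := by
  intro m
  induction m using Nat.strong_induction_on with
  | _ m ih =>
    by_cases hm : m = 0
    · subst hm; simp
    · rw [Nat.digits_def' (by norm_num : (1:Nat) < 10) (Nat.pos_of_ne_zero hm)]
      have := ih (m / 10) (by omega)
      simp only [List.sum_cons]
      omega

lemma dsum_lt (m : Nat) (h : 10 ≤ m) : (Nat.digits 10 m).sum < m := by
  rw [Nat.digits_def' (by norm_num : (1:Nat) < 10) (by omega)]
  have := dsum_le (m / 10)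
  simp only [List.sum_cons]
  omega

lemma dsum_pos : ∀ (m : Nat), m ≠ 0 → 0 < (Nat.digits 10 m).sum := by
  intro m
  induction m using Nat.strong_induction_on with
  | _ m ih =>
    intro hm
    rw [Nat.digits_def' (by norm_num : (1:Nat) < 10) (Nat.pos_of_ne_zero hm)]
    simp only [List.sum_cons]
    by_cases h1 : m % 10 = 0
    · have h2 : m / 10 ≠ 0 := by omega
      have := ih (m / 10) (by omega) h2
      omega
    · omega

lemma dsum_bound : ∀ (k m : Nat), m < 10 ^ k → (Nat.digits 10 m).sum ≤ 9 * k := by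
  intro k
  induction k with
  | zero => intro m h; interval_cases m; simp
  | succ k ih =>
    intro m h
    by_cases hm : m = 0
    · subst hm; simp
    · rw [Nat.digits_def' (by norm_num : (1:Nat) < 10) (Nat.pos_of_ne_zero hm)]
      have hb : m / 10 < 10 ^ k := by
        rw [pow_succ] at h
        omega
      have := ih (m / 10) hb
      simp only [List.sum_cons]
      omega

-- ---- the digital root drB ----

lemma drB_congr (n m : Int) (hn : 1 ≤ n) (hm : 1 ≤ m) (h : n % 9 = m % 9) :
    drB n = drB m := by
  rw [drB, drB, if_neg (by omega), if_neg (by omega),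
    PySem.Int.mod_eq_emod_of_pos (by norm_num), PySem.Int.mod_eq_emod_of_pos (by norm_num)]
  omega

lemma drB_pos_iff (n : Int) (h : 0 ≤ n) : drB n = 0 ↔ n = 0 := by
  rw [drB]
  by_cases hn : n = 0
  · simp [hn]
  · rw [if_neg hn, PySem.Int.mod_eq_emod_of_pos (by norm_num)]
    omega

lemma drB_range (n : Int) (h : 1 ≤ n) : 1 ≤ drB n ∧ drB n ≤ 9 := by
  rw [drB, if_neg (by omega), PySem.Int.mod_eq_emod_of_pos (by norm_num)]
  omega

lemma drB_eq_iff (n k : Int) (hn : 1 ≤ n) (hk1 : 1 ≤ k) (hk9 : k ≤ 9) :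
    drB n = k ↔ (9 : Int) ∣ (n - k) := by
  rw [drB, if_neg (by omega), PySem.Int.mod_eq_emod_of_pos (by norm_num)]
  omega

lemma drB_of_small_dsum (n : Int) (h : 0 ≤ n)
    (hs : ((Nat.digits 10 n.toNat).sum : Int) ≤ 9) :
    ((Nat.digits 10 n.toNat).sum : Int) = drB n := by
  by_cases hn : n = 0
  · subst hn; simp [drB]
  · rw [drB, if_neg hn, PySem.Int.mod_eq_emod_of_pos (by norm_num)]
    have hpos : 0 < (Nat.digits 10 n.toNat).sum := dsum_pos n.toNat (by omega)
    have hmod : (Nat.digits 10 n.toNat).sum % 9 = n.toNat % 9 := dsum_mod9 n.toNat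
    have hcast : ((n.toNat : Int)) = n := by omega
    omega

-- rec_dig_sum computes the digital root (enough fuel; argument below the fuel)
lemma recDigSumA_eq_drB_aux : ∀ (fuel : Nat) (n : Int), 0 ≤ n → n < fuel →
    recDigSumA fuel n = drB n := by
  intro fuel
  induction fuel with
  | zero => intro n h0 h1; omega
  | succ f ih =>
    intro n h0 h1
    rw [recDigSumA_succ f n h0]
    set s : Int := ((Nat.digits 10 n.toNat).sum : Int) with hs
    by_cases hbig : s > 9
    · rw [if_pos hbig]
      have hle : (Nat.digits 10 n.toNat).sum ≤ n.toNat := dsum_le n.toNat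
      have h10 : 10 ≤ n.toNat := by
        by_contra hc
        have := dsum_bound 1 n.toNat (by omega)
        omega
      have hlt : (Nat.digits 10 n.toNat).sum < n.toNat := dsum_lt n.toNat h10
      rw [ih s (by omega) (by omega)]
      apply drB_congr
      · omega
      · omega
      · have hmod : (Nat.digits 10 n.toNat).sum % 9 = n.toNat % 9 := dsum_mod9 n.toNat
        have : ((n.toNat : Int)) = n := by omega
        omega
    · rw [if_neg hbig]
      exact drB_of_small_dsum n h0 (by omega)

lemma recDigSumA_100 (n : Int) (h0 : 0 ≤ n) (h1 : n ≤ 2147483648) :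
    recDigSumA 100 n = drB n := by
  have h99 : (99 : Nat) + 1 = 100 := rfl
  rw [← h99, recDigSumA_succ 99 n h0]
  set s : Int := ((Nat.digits 10 n.toNat).sum : Int) with hs
  have hb : (Nat.digits 10 n.toNat).sum ≤ 90 := by
    apply dsum_bound 10
    omega
  by_cases hbig : s > 9
  · rw [if_pos hbig]
    rw [recDigSumA_eq_drB_aux 99 s (by omega) (by omega)]
    apply drB_congr
    · omega
    · have h10 : 10 ≤ n.toNat := by
        by_contra hc
        have := dsum_bound 1 n.toNat (by omega)
        omega
      omega
    · have hmod : (Nat.digits 10 n.toNat).sum % 9 = n.toNat % 9 := dsum_mod9 n.toNat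
      have : ((n.toNat : Int)) = n := by omega
      omega
  · rw [if_neg hbig]
    exact drB_of_small_dsum n h0 (by omega)

-- ---- counting digital roots over a range ----

lemma countP_drB (low k : Int) (hl : 0 ≤ low) (hk1 : 1 ≤ k) (hk9 : k ≤ 9) :
    ∀ (d : Nat),
    ((PySem.List.pyRange low (low + d + 1) 1).countP (fun n => drB n == k) : Int)
      = PySem.Int.floordiv (low + d - k) 9 - PySem.Int.floordiv (max low 1 - 1 - k) 9 := by
  intro d
  induction d with
  | zero =>
    simp only [Nat.cast_zero, add_zero]
    rw [PySem.List.pyRange_one_singleton]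
    rw [PySem.Int.floordiv_eq_ediv_of_pos (by norm_num), PySem.Int.floordiv_eq_ediv_of_pos (by norm_num)]
    by_cases h0 : low = 0
    · subst h0
      have hdr0 : drB 0 = 0 := by simp [drB]
      simp [List.countP_cons, hdr0]
      omega
    · have h1 : 1 ≤ low := by omega
      rw [List.countP_cons, List.countP_nil]
      have hmax : max low 1 = low := by omega
      by_cases hdr : drB low = k
      · rw [drB_eq_iff low k h1 hk1 hk9] at hdr
        simp only [beq_iff_eq, drB_eq_iff low k h1 hk1 hk9]
        simp [hmax]
        omega
      · simp only [beq_iff_eq]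
        rw [if_neg hdr]
        rw [drB_eq_iff low k h1 hk1 hk9] at hdr
        simp [hmax]
        omega
  | succ d ih =>
    have hsplit : low + (d + 1 : Nat) + 1 = (low + d + 1) + 1 := by push_cast; ring
    rw [hsplit, PySem.List.pyRange_one_succ_right (by omega), List.countP_append]
    rw [List.countP_cons, List.countP_nil]
    push_cast
    push_cast at ih
    rw [PySem.Int.floordiv_eq_ediv_of_pos (by norm_num), PySem.Int.floordiv_eq_ediv_of_pos (by norm_num)] at ih ⊢
    have hn1 : 1 ≤ low + d + 1 := by omega
    by_cases hdr : drB (low + d + 1) = k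
    · rw [drB_eq_iff _ k hn1 hk1 hk9] at hdr
      simp only [beq_iff_eq, drB_eq_iff _ k hn1 hk1 hk9, hdr, if_pos]
      omega
    · have hnd : ¬ (9 : Int) ∣ (low + d + 1 - k) := by
        rw [← drB_eq_iff _ k hn1 hk1 hk9]; exact hdr
      simp only [beq_iff_eq]
      rw [if_neg hdr]
      omega

lemma countP_drB_zero (low : Int) (hl : 0 ≤ low) (high : Int) (hh : low < high) :
    ((PySem.List.pyRange low (high + 1) 1).countP (fun n => drB n == 0) : Int)
      = if low = 0 then 1 else 0 := by
  have hcong : (PySem.List.pyRange low (high + 1) 1).countP (fun n => drB n == 0)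
      = (PySem.List.pyRange low (high + 1) 1).countP (fun n => n == 0) := by
    apply List.countP_congr
    intro n hn
    rw [PySem.List.mem_pyRange_one] at hn
    simp only [beq_iff_eq]
    rw [drB_pos_iff n (by omega)]
  rw [hcong]
  have hcnt : (PySem.List.pyRange low (high + 1) 1).countP (fun n => n == 0)
      = (PySem.List.pyRange low (high + 1) 1).count 0 := by
    simp [List.count]
  rw [hcnt]
  by_cases h0 : low = 0
  · subst h0
    rw [List.count_eq_one_of_mem (PySem.List.nodup_pyRange_one _ _)
      (by rw [PySem.List.mem_pyRange_one]; omega)]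
    norm_num
  · rw [List.count_eq_zero_of_not_mem
      (by rw [PySem.List.mem_pyRange_one]; omega)]
    simp [h0]

-- the set of digital roots over [low, high] is settled within the first ten values
lemma dedup_drB_eq (low high : Int) (hl : 0 ≤ low) (hh : low < high) :
    PySem.List.dedup ((PySem.List.pyRange low (high + 1) 1).map drB)
      = PySem.List.dedup ((PySem.List.pyRange low (min high (low + 9) + 1) 1).map drB) := by
  by_cases hsmall : high ≤ low + 9
  · rw [min_eq_left hsmall]
  · have hmin : min high (low + 9) = low + 9 := by omega
    rw [hmin]
    have h10 : low + 9 + 1 = low + 10 := by ring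
    rw [h10]
    rw [PySem.List.pyRange_one_append low (low + 10) (high + 1) (by omega) (by omega)]
    rw [List.map_append]
    simp only [PySem.List.dedup_eq_ofList]
    rw [PySem.Set.ofList_append]
    rw [PySem.Set.update_eq_append_filter]
    have hfilter : (PySem.Set.ofList ((PySem.List.pyRange (low + 10) (high + 1) 1).map drB)).filter
        (fun y => !(PySem.Set.contains (PySem.Set.ofList ((PySem.List.pyRange low (low + 10) 1).map drB)) y)) = [] := by
      rw [List.filter_eq_nil_iff]
      intro y hy
      have hy' : y ∈ (PySem.List.pyRange (low + 10) (high + 1) 1).map drB := by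
        rw [← PySem.Set.mem_ofList]; exact hy
      rw [List.mem_map] at hy'
      obtain ⟨n, hn, rfl⟩ := hy'
      rw [PySem.List.mem_pyRange_one] at hn
      have hmem : drB n ∈ (PySem.List.pyRange low (low + 10) 1).map drB := by
        rw [List.mem_map]
        refine ⟨low + 1 + (n - low - 1) % 9, ?_, ?_⟩
        · rw [PySem.List.mem_pyRange_one]; omega
        · exact drB_congr _ n (by omega) (by omega) (by omega)
      intro hfalse
      rw [Bool.not_eq_true', ← Bool.not_eq_true, PySem.Set.contains_iff,
        PySem.Set.mem_ofList] at hfalse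
      exact hfalse hmem
    rw [hfilter, List.append_nil]

-- ===== VERDICT (by name: the statement is the Claim_ definition above) =====
theorem distr_of_rec_digit_sums_spec : Claim_equal_distr_of_rec_digit_sums := by
  intro low high hdom hpre
  obtain ⟨hl, hlh⟩ := hpre
  simp only [Dom_distr_of_rec_digit_sums, pvDomInt, Bool.and_eq_true, decide_eq_true_eq] at hdom
  obtain ⟨hlow, hhigh⟩ := hdom
  unfold Spec_distr_of_rec_digit_sums
  rw [distr_of_rec_digit_sums, distr_of_rec_digit_sums_alt,
    if_neg (by omega), if_neg (by omega)]
  -- A's loop: replace the recursive digit sum by the digital root and collapse the if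
  have hstep : (PySem.List.pyRange low (high + 1) 1).foldl
      (fun (rec_dic : PySem.Dict Int Int) n =>
        if rec_dic.contains (recDigSumA 100 n) = false then
          rec_dic.insert (recDigSumA 100 n) 1
        else
          rec_dic.insert (recDigSumA 100 n) (rec_dic.getD (recDigSumA 100 n) 0 + 1))
      PySem.Dict.empty
      = (PySem.List.pyRange low (high + 1) 1).foldl
        (fun (rec_dic : PySem.Dict Int Int) n =>
          rec_dic.insert (drB n) (rec_dic.getD (drB n) 0 + 1))
        PySem.Dict.empty := by
    apply PySem.List.foldl_congr_mem
    intro d n hn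
    rw [PySem.List.mem_pyRange_one] at hn
    rw [recDigSumA_100 n (by omega) (by omega)]
    by_cases hc : d.contains (drB n) = false
    · rw [if_pos hc, PySem.Dict.getD_of_not_contains _ _ hc]
      norm_num
    · rw [if_neg hc]
  rw [hstep, ← List.foldl_map (f := drB)
    (g := fun (rec_dic : PySem.Dict Int Int) k => rec_dic.insert k (rec_dic.getD k 0 + 1)),
    PySem.Dict.foldl_insert_getD_add_one_eq_counter, PySem.Dict.items_counter]
  rw [show PySem.Set.ofList ((PySem.List.pyRange low (high + 1) 1).map drB)
      = PySem.List.dedup ((PySem.List.pyRange low (high + 1) 1).map drB) from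
      (PySem.List.dedup_eq_ofList _).symm]
  rw [dedup_drB_eq low high hl hlh]
  apply List.map_congr_left
  intro k hk
  rw [PySem.List.dedup_eq_ofList, PySem.Set.mem_ofList, List.mem_map] at hk
  obtain ⟨n, hn, rfl⟩ := hk
  rw [PySem.List.mem_pyRange_one] at hn
  congr 1
  have hcount : List.count (drB n) ((PySem.List.pyRange low (high + 1) 1).map drB)
      = List.countP (fun m => drB m == drB n) (PySem.List.pyRange low (high + 1) 1) := by
    rw [List.count, List.countP_map]
    rfl
  rw [hcount]
  by_cases hzero : drB n = 0
  · rw [hzero]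
    have hn0 : n = 0 := (drB_pos_iff n (by omega)).mp hzero
    have hlow0 : low = 0 := by omega
    rw [if_pos rfl]
    rw [countP_drB_zero low hl high hlh, if_pos hlow0]
  · have hn1 : 1 ≤ n := by
      rcases Int.lt_or_le 0 n with h | h
      · omega
      · exfalso; apply hzero; rw [drB_pos_iff n (by omega)]; omega
    obtain ⟨hk1, hk9⟩ := drB_range n hn1
    rw [if_neg hzero]
    have hd : low + ((high - low).toNat : Int) = high := by omega
    have hc := countP_drB low (drB n) hl hk1 hk9 (high - low).toNat
    rw [hd] at hc
    rw [hc]
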